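-- pv_equiv track=rewrite | github.com/Nyllea/AoC-2023 | Day12/Problem2.py | ensure_length_coherence
-- ===== SOURCE A (Python) =====
-- def ensure_length_coherence(spring_line, nbr_damaged_springs):
--     # If one of the list is empty, there is no element to remove
--     if len(spring_line) == 0 or len(nbr_damaged_springs) == 0:
--         return spring_line, nbr_damaged_springs
--
--     for i in [0, -1]:
--         # If there is a # in the line and we need to place as many # as the length of the line
--         # Then there is only one possibility and we can remove the line
--         while len(spring_line[i]) == nbr_damaged_springs[i] and '#' in spring_line[i]:
--             # The formulation i+1:(spring_len+1)*i+spring_len returns 1:spring_len if i=0 (ie removes the first element)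
--             # and 0:spring_len-1 if i=-1 (ie removes the last element)
--             spring_len = len(spring_line)
--             spring_line = spring_line[i+1:(spring_len+1)*i+spring_len]
--
--             nbr_len = len(nbr_damaged_springs)
--             nbr_damaged_springs = nbr_damaged_springs[i+1:(nbr_len+1)*i+nbr_len]
--
--             # If it was the last element that we just removed
--             if spring_len == 1 or nbr_len == 1:
--                 # Then we now have at least one empty list, so no further simplification is possible
--                 return spring_line, nbr_damaged_springs
--
--
--         # While there isn't enough characters to put the required amount of #
--         while len(spring_line[i]) < nbr_damaged_springs[i]:
--             # If there is a # in the line, then the problem is impossible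
--             if '#' in spring_line[i]:
--                 return [], [-1]
--
--             # Otherwise, all the ? in this line are ., so we can remove them from the line
--             else:
--                 spring_len = len(spring_line)
--
--                 # If it is the last line, then removing it will leave an empty list
--                 # So the problem is not possible to solve (since nbr_damaged_springs is not empty)
--                 if spring_len == 1:
--                     return [], [-1]
--
--                 # Otherwise, we can remove the line from spring_line
--                 else:
--                     spring_line = spring_line[i+1:(spring_len+1)*i+spring_len]
--
--     return spring_line, nbr_damaged_springs
-- ===== SOURCE B (Python) =====
-- def _trim_end(sl, nd):
--     # Trim coherent elements at the END of the two aligned lists, in place (O(1) pops).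
--     # Returns 'empty' if a list ran out, 'impossible' if unsolvable, 'ok' otherwise.
--     while len(sl[-1]) == nd[-1] and '#' in sl[-1]:
--         sl.pop()
--         nd.pop()
--         if not sl or not nd:
--             return 'empty'
--     while len(sl[-1]) < nd[-1]:
--         if '#' in sl[-1] or len(sl) == 1:
--             return 'impossible'
--         sl.pop()
--     return 'ok'
--
--
-- def ensure_length_coherence(spring_line, nbr_damaged_springs):
--     if not spring_line or not nbr_damaged_springs:
--         return spring_line, nbr_damaged_springs
--     # Reverse once so that trimming the original FRONT is an O(1) pop at the end.
--     sl = spring_line[::-1]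
--     nd = nbr_damaged_springs[::-1]
--     r = _trim_end(sl, nd)
--     if r == 'empty':
--         return sl[::-1], nd[::-1]
--     if r == 'impossible':
--         return [], [-1]
--     # Back to original order; now trim the original BACK with O(1) pops.
--     sl.reverse()
--     nd.reverse()
--     r = _trim_end(sl, nd)
--     if r == 'impossible':
--         return [], [-1]
--     return sl, nd
-- ===== Notes on version B (the rewrite author's own statement) =====
-- stated objective: faster
-- what changed: B replaces A's repeated whole-list slicing (a fresh copy of both lists per removed element, via index-sign arithmetic) with one shared end-trimmer that pops elements in O(1) from a once-reversed copy, reversing back at the end.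
import Mathlib
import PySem

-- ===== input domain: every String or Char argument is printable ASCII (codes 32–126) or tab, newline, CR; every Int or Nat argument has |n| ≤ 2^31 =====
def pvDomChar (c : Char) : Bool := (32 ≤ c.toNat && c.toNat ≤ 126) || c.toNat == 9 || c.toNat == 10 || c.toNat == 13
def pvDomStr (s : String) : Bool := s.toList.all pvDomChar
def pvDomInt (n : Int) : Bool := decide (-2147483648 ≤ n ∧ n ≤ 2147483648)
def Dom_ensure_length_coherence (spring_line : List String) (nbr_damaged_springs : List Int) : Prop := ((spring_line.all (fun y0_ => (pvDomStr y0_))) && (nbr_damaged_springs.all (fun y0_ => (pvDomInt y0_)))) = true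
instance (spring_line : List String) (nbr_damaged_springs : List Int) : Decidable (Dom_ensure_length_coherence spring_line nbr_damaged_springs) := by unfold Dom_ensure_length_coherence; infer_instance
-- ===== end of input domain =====

-- B trims with O(1) pops on a once-reversed copy (one shared end-trimmer) instead of
-- re-slicing both whole lists at every removal; equivalence of return values is proved below.

-- ===== PORT A =====
-- the '==' while loop of A for end i (0 or -1); Bool = an early `return` happened
def elcPhase1 (i : Int) (sl : List String) (nd : List Int) : (List String × List Int) × Bool :=
  match PySem.List.pyGet? sl i, PySem.List.pyGet? nd i with
  | some s, some n =>
    if ((PySem.Str.len s : Int) = n ∧ PySem.Str.isIn "#" s = true) then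
      let spring_len : Int := sl.length
      let sl' := PySem.List.slice sl (some (i+1)) (some ((spring_len+1)*i + spring_len))
      let nbr_len : Int := nd.length
      let nd' := PySem.List.slice nd (some (i+1)) (some ((nbr_len+1)*i + nbr_len))
      if spring_len = 1 ∨ nbr_len = 1 then ((sl', nd'), true)
      else if _h : sl'.length < sl.length then elcPhase1 i sl' nd'  -- guard: totality only (always true for i ∈ {0,-1})
      else ((sl', nd'), false)
    else ((sl, nd), false)
  | _, _ => ((sl, nd), false)  -- unreachable under the call pattern (IndexError guard)
termination_by sl.length

-- the '<' while loop of A for end i; none = the early `return [], [-1]`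
def elcPhase2 (i : Int) (sl : List String) (nd : List Int) : Option (List String) :=
  match PySem.List.pyGet? sl i, PySem.List.pyGet? nd i with
  | some s, some n =>
    if ((PySem.Str.len s : Int) < n) then
      if PySem.Str.isIn "#" s = true then none
      else
        let spring_len : Int := sl.length
        if spring_len = 1 then none
        else
          let sl' := PySem.List.slice sl (some (i+1)) (some ((spring_len+1)*i + spring_len))
          if _h : sl'.length < sl.length then elcPhase2 i sl' nd  -- guard: totality only
          else some sl'
    else some sl
  | _, _ => some sl  -- unreachable under the call pattern
termination_by sl.length

def ensure_length_coherence (spring_line : List String) (nbr_damaged_springs : List Int) : List String × List Int :=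
  if spring_line.length = 0 ∨ nbr_damaged_springs.length = 0 then (spring_line, nbr_damaged_springs)
  else
    match elcPhase1 0 spring_line nbr_damaged_springs with
    | (p, true) => p
    | ((sl1, nd1), false) =>
      match elcPhase2 0 sl1 nd1 with
      | none => ([], [-1])
      | some sl2 =>
        match elcPhase1 (-1) sl2 nd1 with
        | (p, true) => p
        | ((sl3, nd3), false) =>
          match elcPhase2 (-1) sl3 nd3 with
          | none => ([], [-1])
          | some sl4 => (sl4, nd3)

-- ===== PORT B =====
inductive TrimRes where
  | empty : List String → List Int → TrimRes
  | impossible : TrimRes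
  | ok : List String → List Int → TrimRes
deriving DecidableEq, Repr

-- second while of _trim_end ('not enough room'): pops only from sl
def trimEnd2 (sl : List String) (nd : List Int) : TrimRes :=
  match sl.getLast?, nd.getLast? with
  | some s, some n =>
    if ((PySem.Str.len s : Int) < n) then
      if (PySem.Str.isIn "#" s || sl.length == 1) then .impossible
      else if _h : sl.dropLast.length < sl.length then trimEnd2 sl.dropLast nd
      else .impossible  -- guard: totality only (sl is never [] here)
    else .ok sl nd
  | _, _ => .ok sl nd  -- unreachable under the call pattern
termination_by sl.length

-- first while of _trim_end ('forced line'): pops from both, then falls into trimEnd2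
def trimEnd1 (sl : List String) (nd : List Int) : TrimRes :=
  match sl.getLast?, nd.getLast? with
  | some s, some n =>
    if ((PySem.Str.len s : Int) = n ∧ PySem.Str.isIn "#" s = true) then
      let sl' := sl.dropLast
      let nd' := nd.dropLast
      if sl' = [] ∨ nd' = [] then .empty sl' nd'
      else if _h : sl'.length < sl.length then trimEnd1 sl' nd'
      else .empty sl' nd'  -- guard: totality only (sl is never [] here)
    else trimEnd2 sl nd
  | _, _ => trimEnd2 sl nd  -- unreachable under the call pattern
termination_by sl.length

def ensure_length_coherence_alt (spring_line : List String) (nbr_damaged_springs : List Int) : List String × List Int :=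
  if spring_line = [] ∨ nbr_damaged_springs = [] then (spring_line, nbr_damaged_springs)
  else
    match trimEnd1 spring_line.reverse nbr_damaged_springs.reverse with
    | .empty a b => (a.reverse, b.reverse)
    | .impossible => ([], [-1])
    | .ok a b =>
      match trimEnd1 a.reverse b.reverse with
      | .empty a b => (a, b)
      | .impossible => ([], [-1])
      | .ok a b => (a, b)

-- ===== PRECONDITION & SPEC =====
def Spec_ensure_length_coherence (spring_line : List String) (nbr_damaged_springs : List Int) (out : List String × List Int) : Prop := out = ensure_length_coherence_alt spring_line nbr_damaged_springs
instance (spring_line : List String) (nbr_damaged_springs : List Int) (out : List String × List Int) : Decidable (Spec_ensure_length_coherence spring_line nbr_damaged_springs out) := by unfold Spec_ensure_length_coherence; infer_instance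

-- ===== CLAIM (what is proved, stated in full; the proofs are below) =====
def Claim_equal_ensure_length_coherence : Prop := ∀ (spring_line : List String) (nbr_damaged_springs : List Int), Dom_ensure_length_coherence spring_line nbr_damaged_springs → Spec_ensure_length_coherence spring_line nbr_damaged_springs (ensure_length_coherence spring_line nbr_damaged_springs)

-- ===== LEMMAS AND PROOFS =====
def AtoRes (i : Int) (sl : List String) (nd : List Int) : TrimRes :=
  match elcPhase1 i sl nd with
  | (p, true) => .empty p.1 p.2
  | ((a, b), false) =>
    match elcPhase2 i a b with
    | none => .impossible
    | some a' => .ok a' b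

def revRes : TrimRes → TrimRes
  | .empty a b => .empty a.reverse b.reverse
  | .impossible => .impossible
  | .ok a b => .ok a.reverse b.reverse
theorem slice_i0 {α : Type} (l : List α) :
    PySem.List.slice l (some ((0:Int)+1)) (some (((l.length:Int)+1)*0 + (l.length:Int))) = l.tail := by
  have h1 : ((0:Int)+1) = ((1:Nat):Int) := by norm_num
  have h2 : (((l.length:Int))+1)*0 + (l.length:Int) = ((l.length:Nat):Int) := by ring
  rw [h1, h2, PySem.List.slice_natCast]
  rcases l with _ | ⟨a, t⟩ <;> simp

theorem slice_im1 {α : Type} (l : List α) :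
    PySem.List.slice l (some ((-1:Int)+1)) (some (((l.length:Int)+1)*(-1) + (l.length:Int))) = l.dropLast := by
  have h1 : ((-1:Int)+1) = (0:Int) := by norm_num
  have h2 : (((l.length:Int))+1)*(-1) + (l.length:Int) = (-1:Int) := by ring
  rw [h1, h2]
  simp [PySem.List.slice_zero_start, PySem.List.slice_to_neg_one]

theorem Lback2 : ∀ (k : Nat) (sl : List String) (nd : List Int), sl.length ≤ k → sl ≠ [] → nd ≠ [] →
    (match elcPhase2 (-1) sl nd with | none => TrimRes.impossible | some a => TrimRes.ok a nd) = trimEnd2 sl nd := by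
  intro k
  induction k with
  | zero => intro sl nd hk hsl hnd; simp [List.length_eq_zero_iff] at hk; exact absurd hk hsl
  | succ k ih =>
    intro sl nd hk hsl hnd
    cases hgs : sl.getLast? with
    | none => simp [List.getLast?_eq_none_iff] at hgs; exact absurd hgs hsl
    | some s =>
    cases hgn : nd.getLast? with
    | none => simp [List.getLast?_eq_none_iff] at hgn; exact absurd hgn hnd
    | some n =>
    rw [elcPhase2, trimEnd2]
    simp only [PySem.List.pyGet?_neg_one, hgs, hgn]
    by_cases hlt : ((PySem.Str.len s : Int) < n)
    · simp only [if_pos hlt]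
      by_cases hin : PySem.Str.isIn "#" s = true
      · simp only [hin, if_pos, Bool.true_or, if_true]
      · have hinf : PySem.Str.isIn "#" s = false := by simp only [Bool.not_eq_true] at hin; exact hin
        have hpos : 0 < sl.length := List.length_pos_iff.mpr hsl
        by_cases h1 : (sl.length : Int) = 1
        · have hb : (sl.length == 1) = true := by simp; omega
          simp only [hinf, hb, Bool.false_or, if_pos h1, if_true]
          simp
        · have hlen1 : sl.length ≠ 1 := by intro h; exact h1 (by exact_mod_cast congrArg Nat.cast h)
          have hdec : sl.dropLast.length < sl.length := by simp only [List.length_dropLast]; omega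
          have hb : (sl.length == 1) = false := by simp; omega
          simp only [if_neg h1, slice_im1 sl, dif_pos hdec, hinf, hb, Bool.or_self, Bool.false_eq_true, if_false]
          apply ih sl.dropLast nd
          · simp only [List.length_dropLast]; omega
          · intro h; have := congrArg List.length h
            simp only [List.length_dropLast, List.length_nil] at this; omega
          · exact hnd
    · simp only [if_neg hlt]
theorem dropLast_ne_nil_of_len {α : Type} (l : List α) (h : 1 < l.length) : l.dropLast ≠ [] := by
  intro he; have := congrArg List.length he
  simp only [List.length_dropLast, List.length_nil] at this; omega

theorem Lback : ∀ (k : Nat) (sl : List String) (nd : List Int), sl.length ≤ k → sl ≠ [] → nd ≠ [] →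
    AtoRes (-1) sl nd = trimEnd1 sl nd := by
  intro k
  induction k with
  | zero => intro sl nd hk hsl hnd; simp [List.length_eq_zero_iff] at hk; exact absurd hk hsl
  | succ k ih =>
    intro sl nd hk hsl hnd
    cases hgs : sl.getLast? with
    | none => simp [List.getLast?_eq_none_iff] at hgs; exact absurd hgs hsl
    | some s =>
    cases hgn : nd.getLast? with
    | none => simp [List.getLast?_eq_none_iff] at hgn; exact absurd hgn hnd
    | some n =>
    have hpos : 0 < sl.length := List.length_pos_iff.mpr hsl
    have hposn : 0 < nd.length := List.length_pos_iff.mpr hnd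
    rw [AtoRes, elcPhase1, trimEnd1]
    simp only [PySem.List.pyGet?_neg_one, hgs, hgn]
    by_cases hc : ((PySem.Str.len s : Int) = n ∧ PySem.Str.isIn "#" s = true)
    · simp only [if_pos hc, slice_im1 sl, slice_im1 nd]
      by_cases hone : ((sl.length : Int) = 1 ∨ (nd.length : Int) = 1)
      · have hnil : sl.dropLast = [] ∨ nd.dropLast = [] := by
          rcases hone with h | h
          · left; have : sl.length = 1 := by exact_mod_cast h
            rcases sl with _ | ⟨a, t⟩ <;> simp_all
          · right; have : nd.length = 1 := by exact_mod_cast h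
            rcases nd with _ | ⟨a, t⟩ <;> simp_all
        simp only [if_pos hone, if_pos hnil]
      · have h1 : sl.length ≠ 1 := by intro h; exact hone (Or.inl (by exact_mod_cast congrArg Nat.cast h))
        have h2 : nd.length ≠ 1 := by intro h; exact hone (Or.inr (by exact_mod_cast congrArg Nat.cast h))
        have hnil : ¬(sl.dropLast = [] ∨ nd.dropLast = []) := by
          push_neg
          exact ⟨dropLast_ne_nil_of_len sl (by omega), dropLast_ne_nil_of_len nd (by omega)⟩
        have hdec : sl.dropLast.length < sl.length := by simp only [List.length_dropLast]; omega
        simp only [if_neg hone, if_neg hnil, dif_pos hdec]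
        apply ih sl.dropLast nd.dropLast
        · simp only [List.length_dropLast]; omega
        · exact dropLast_ne_nil_of_len sl (by omega)
        · exact dropLast_ne_nil_of_len nd (by omega)
    · simp only [if_neg hc]
      exact Lback2 (k+1) sl nd hk hsl hnd
theorem Lfront2 : ∀ (k : Nat) (sl : List String) (nd : List Int), sl.length ≤ k → sl ≠ [] → nd ≠ [] →
    trimEnd2 sl.reverse nd.reverse =
      (match elcPhase2 0 sl nd with | none => TrimRes.impossible | some a => TrimRes.ok a.reverse nd.reverse) := by
  intro k
  induction k with
  | zero => intro sl nd hk hsl hnd; simp [List.length_eq_zero_iff] at hk; exact absurd hk hsl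
  | succ k ih =>
    intro sl nd hk hsl hnd
    rcases sl with _ | ⟨s, t⟩
    · exact absurd rfl hsl
    rcases nd with _ | ⟨n, m⟩
    · exact absurd rfl hnd
    rw [elcPhase2, trimEnd2]
    have hgs : (s::t).reverse.getLast? = some s := by simp [List.getLast?_reverse]
    have hgn : (n::m).reverse.getLast? = some n := by simp [List.getLast?_reverse]
    have hps : PySem.List.pyGet? (s::t) 0 = some s := by simp [pysem]
    have hpn : PySem.List.pyGet? (n::m) 0 = some n := by simp [pysem]
    simp only [hgs, hgn, hps, hpn]
    by_cases hlt : ((PySem.Str.len s : Int) < n)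
    · simp only [if_pos hlt]
      by_cases hin : PySem.Str.isIn "#" s = true
      · simp only [hin, Bool.true_or, if_true]
      · have hinf : PySem.Str.isIn "#" s = false := by simp only [Bool.not_eq_true] at hin; exact hin
        by_cases h1 : ((s::t).length : Int) = 1
        · have ht : t = [] := by
            have : (s::t).length = 1 := by exact_mod_cast h1
            simpa using this
          subst ht
          simp only [hinf, h1, if_pos, if_true]
          simp
        · have ht : t ≠ [] := by
            intro h; subst h; simp at h1
          have htl : 0 < t.length := List.length_pos_iff.mpr ht
          have hb : ((s::t).reverse.length == 1) = false := by simp; omega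
          have hdec2 : (s::t).reverse.dropLast.length < (s::t).reverse.length := by
            simp only [List.length_dropLast, List.length_reverse]; simp
          have hdec : (PySem.List.slice (s::t) (some ((0:Int)+1))
              (some ((((s::t).length:Int)+1)*0 + ((s::t).length:Int)))).length < (s::t).length := by
            rw [slice_i0]; simp
          simp only [if_neg h1, slice_i0, hinf, hb, Bool.or_self,
            Bool.false_eq_true, if_false, List.dropLast_reverse, List.tail_cons]
          rw [dif_pos (show t.reverse.length < (s::t).reverse.length by simp),
              dif_pos (show t.length < (s::t).length by simp)]
          exact ih t (n::m) (by simp at hk ⊢; omega) ht hnd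
    · simp only [if_neg hlt]
theorem Lfront : ∀ (k : Nat) (sl : List String) (nd : List Int), sl.length ≤ k → sl ≠ [] → nd ≠ [] →
    trimEnd1 sl.reverse nd.reverse = revRes (AtoRes 0 sl nd) := by
  intro k
  induction k with
  | zero => intro sl nd hk hsl hnd; simp [List.length_eq_zero_iff] at hk; exact absurd hk hsl
  | succ k ih =>
    intro sl nd hk hsl hnd
    rcases sl with _ | ⟨s, t⟩
    · exact absurd rfl hsl
    rcases nd with _ | ⟨n, m⟩
    · exact absurd rfl hnd
    rw [AtoRes, elcPhase1, trimEnd1]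
    have hgs : (s::t).reverse.getLast? = some s := by simp [List.getLast?_reverse]
    have hgn : (n::m).reverse.getLast? = some n := by simp [List.getLast?_reverse]
    have hps : PySem.List.pyGet? (s::t) 0 = some s := by simp [pysem]
    have hpn : PySem.List.pyGet? (n::m) 0 = some n := by simp [pysem]
    simp only [hgs, hgn, hps, hpn]
    by_cases hc : ((PySem.Str.len s : Int) = n ∧ PySem.Str.isIn "#" s = true)
    · simp only [if_pos hc, slice_i0, List.tail_cons, List.dropLast_reverse]
      by_cases hone : (((s::t).length : Int) = 1 ∨ ((n::m).length : Int) = 1)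
      · have hnil : t.reverse = [] ∨ m.reverse = [] := by
          rcases hone with h | h
          · left
            have h' : (s::t).length = 1 := by exact_mod_cast h
            have h'' : t = [] := by simpa using h'
            simp [h'']
          · right
            have h' : (n::m).length = 1 := by exact_mod_cast h
            have h'' : m = [] := by simpa using h'
            simp [h'']
        simp only [if_pos hone, if_pos hnil, revRes]
      · have ht : t ≠ [] := by intro h; subst h; simp at hone
        have hm : m ≠ [] := by intro h; subst h; simp at hone
        have hnil : ¬(t.reverse = [] ∨ m.reverse = []) := by
          push_neg; constructor <;> simp [ht, hm]
        simp only [if_neg hone, if_neg hnil]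
        rw [dif_pos (show t.reverse.length < (s::t).reverse.length by simp),
            dif_pos (show t.length < (s::t).length by simp)]
        exact ih t m (by simp at hk ⊢; omega) ht hm
    · simp only [if_neg hc]
      rw [Lfront2 (k+1) (s::t) (n::m) hk hsl hnd]
      cases helc : elcPhase2 0 (s::t) (n::m) <;> simp [revRes]
theorem phase1_0_ne : ∀ (k : Nat) (sl : List String) (nd : List Int), sl.length ≤ k → sl ≠ [] → nd ≠ [] →
    ∀ a b, elcPhase1 0 sl nd = ((a, b), false) → a ≠ [] ∧ b ≠ [] := by
  intro k
  induction k with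
  | zero => intro sl nd hk hsl hnd; simp [List.length_eq_zero_iff] at hk; exact absurd hk hsl
  | succ k ih =>
    intro sl nd hk hsl hnd a b heq
    rcases sl with _ | ⟨s, t⟩
    · exact absurd rfl hsl
    rcases nd with _ | ⟨n, m⟩
    · exact absurd rfl hnd
    rw [elcPhase1] at heq
    have hps : PySem.List.pyGet? (s::t) 0 = some s := by simp [pysem]
    have hpn : PySem.List.pyGet? (n::m) 0 = some n := by simp [pysem]
    simp only [hps, hpn] at heq
    by_cases hc : ((PySem.Str.len s : Int) = n ∧ PySem.Str.isIn "#" s = true)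
    · simp only [if_pos hc, slice_i0, List.tail_cons] at heq
      by_cases hone : (((s::t).length : Int) = 1 ∨ ((n::m).length : Int) = 1)
      · simp only [if_pos hone] at heq
        exact absurd (congrArg Prod.snd heq) (by simp)
      · have ht : t ≠ [] := by intro h; subst h; simp at hone
        have hm : m ≠ [] := by intro h; subst h; simp at hone
        simp only [if_neg hone] at heq
        rw [dif_pos (show t.length < (s::t).length by simp)] at heq
        exact ih t m (by simp at hk ⊢; omega) ht hm a b heq
    · simp only [if_neg hc] at heq
      obtain ⟨h1, h2⟩ := Prod.mk.injEq _ _ _ _ ▸ (congrArg Prod.fst heq)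
      constructor
      · intro h; rw [h] at h1; exact absurd h1.symm (by simp)
      · intro h; rw [h] at h2; exact absurd h2.symm (by simp)

theorem phase2_0_ne : ∀ (k : Nat) (sl : List String) (nd : List Int), sl.length ≤ k → sl ≠ [] → nd ≠ [] →
    ∀ a, elcPhase2 0 sl nd = some a → a ≠ [] := by
  intro k
  induction k with
  | zero => intro sl nd hk hsl hnd; simp [List.length_eq_zero_iff] at hk; exact absurd hk hsl
  | succ k ih =>
    intro sl nd hk hsl hnd a heq
    rcases sl with _ | ⟨s, t⟩
    · exact absurd rfl hsl
    rcases nd with _ | ⟨n, m⟩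
    · exact absurd rfl hnd
    rw [elcPhase2] at heq
    have hps : PySem.List.pyGet? (s::t) 0 = some s := by simp [pysem]
    have hpn : PySem.List.pyGet? (n::m) 0 = some n := by simp [pysem]
    simp only [hps, hpn] at heq
    by_cases hlt : ((PySem.Str.len s : Int) < n)
    · simp only [if_pos hlt] at heq
      by_cases hin : PySem.Str.isIn "#" s = true
      · rw [if_pos hin] at heq
        exact absurd heq (by simp)
      · by_cases h1 : (((s::t).length) : Int) = 1
        · rw [if_neg hin, if_pos h1] at heq
          exact absurd heq (by simp)
        · have ht : t ≠ [] := by intro h; subst h; simp at h1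
          simp only [hin, Bool.false_eq_true, if_false, if_neg h1, slice_i0, List.tail_cons] at heq
          rw [dif_pos (show t.length < (s::t).length by simp)] at heq
          exact ih t (n::m) (by simp at hk ⊢; omega) ht hnd a heq
    · simp only [if_neg hlt] at heq
      rw [← Option.some_inj.mp heq]
      exact hsl
theorem ensure_length_coherence_spec : Claim_equal_ensure_length_coherence := by
  intro sl nd _hdom
  unfold Spec_ensure_length_coherence
  rw [ensure_length_coherence, ensure_length_coherence_alt]
  by_cases h0 : sl.length = 0 ∨ nd.length = 0
  · have h0' : sl = [] ∨ nd = [] := by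
      rcases h0 with h | h
      · exact Or.inl (List.length_eq_zero_iff.mp h)
      · exact Or.inr (List.length_eq_zero_iff.mp h)
    rw [if_pos h0, if_pos h0']
  · have hsl : sl ≠ [] := by intro h; subst h; simp at h0
    have hnd : nd ≠ [] := by intro h; subst h; simp at h0
    have h0' : ¬(sl = [] ∨ nd = []) := by push_neg; exact ⟨hsl, hnd⟩
    rw [if_neg h0, if_neg h0']
    rw [Lfront sl.length sl nd le_rfl hsl hnd]
    rcases hA1 : elcPhase1 0 sl nd with ⟨⟨a, b⟩, flag⟩
    cases flag with
    | true =>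
      simp only [AtoRes, hA1, revRes, List.reverse_reverse]
    | false =>
      have hab := phase1_0_ne sl.length sl nd le_rfl hsl hnd a b hA1
      simp only [AtoRes, hA1]
      cases hA2 : elcPhase2 0 a b with
      | none => simp only [revRes]
      | some a2 =>
        have ha2 := phase2_0_ne a.length a b le_rfl hab.1 hab.2 a2 hA2
        simp only [revRes, List.reverse_reverse]
        rw [← Lback a2.length a2 b le_rfl ha2 hab.2]
        rcases hA3 : elcPhase1 (-1) a2 b with ⟨⟨c, d⟩, flag2⟩
        cases flag2 with
        | true => simp only [AtoRes, hA3]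
        | false =>
          simp only [AtoRes, hA3]
          cases hA4 : elcPhase2 (-1) c d <;> simp
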